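-- pv_equiv track=rewrite | github.com/coolbits-dm/camarad.ai | backend_py/scripts/beta_trace_agent_landing_audit.py | _event_flags
-- ===== SOURCE A (Python) =====
-- def _event_flags(scoped_events, token: str, agent_id: str):
--     token_q = f"src={token}"
--     expected_agent = f"agent={agent_id}"
--
--     landing_view = next(
--         (
--             e for e in scoped_events
--             if e["method"] == "GET"
--             and (
--                 f"/agents/{agent_id}" in e["path"]
--                 or (f"/{agent_id}-ai" in e["path"] if agent_id in ("ceo", "devops") else False)
--                 or ("/ppc-ai" in e["path"] if agent_id == "ppc" else False)
--                 or ("/personal-ai" in e["path"] if agent_id == "personal" else False)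
--             )
--             and token_q in e["path"]
--         ),
--         None,
--     )
--     cta_click = next(
--         (
--             e for e in scoped_events
--             if e["method"] == "GET"
--             and "/api/auth/google/start" in e["path"]
--             and "from=agent-landing" in e["path"]
--             and expected_agent in e["path"]
--         ),
--         None,
--     )
--     post_oauth_chat = next(
--         (
--             e for e in scoped_events
--             if e["method"] == "GET"
--             and "/chat/" in e["path"]
--             and "from=agent-landing" in e["path"]
--             and expected_agent in e["path"]
--         ),
--         None,
--     )
--     first_send = next(
--         (
--             e for e in scoped_events
--             if e["method"] == "POST"
--             and ("/chat/" in e["path"] or "/api/chat" in e["path"] or "/api/chats" in e["path"])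
--         ),
--         None,
--     )
--     return {
--         "agent_landing_view": landing_view,
--         "agent_landing_cta_click": cta_click,
--         "post_oauth_redirect_to_chat": post_oauth_chat,
--         "first_chat_send": first_send,
--     }
-- ===== SOURCE B (Python) =====
-- def _event_flags(scoped_events, token: str, agent_id: str):
--     token_q = "src=" + token
--     expected_agent = "agent=" + agent_id
--     landing_paths = ["/agents/" + agent_id]
--     if agent_id in ("ceo", "devops", "ppc", "personal"):
--         landing_paths.append("/" + agent_id + "-ai")
--     landing = cta = chat = send = None
--     for e in scoped_events:
--         method = e["method"]
--         if method == "GET":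
--             path = e["path"]
--             if landing is None and token_q in path and any(s in path for s in landing_paths):
--                 landing = e
--             if cta is None and "/api/auth/google/start" in path and "from=agent-landing" in path and expected_agent in path:
--                 cta = e
--             if chat is None and "/chat/" in path and "from=agent-landing" in path and expected_agent in path:
--                 chat = e
--         elif method == "POST":
--             path = e["path"]
--             if send is None and ("/chat/" in path or "/api/chat" in path or "/api/chats" in path):
--                 send = e
--         if landing is not None and cta is not None and chat is not None and send is not None:
--             break
--     return {
--         "agent_landing_view": landing,
--         "agent_landing_cta_click": cta,
--         "post_oauth_redirect_to_chat": chat,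
--         "first_chat_send": send,
--     }
-- ===== Notes on version B (the rewrite author's own statement) =====
-- stated objective: alternative
-- what changed: A scans scoped_events four times, once per funnel flag via next(...); B makes a single pass that fills four first-match slots (with the agent alias paths precomputed as a list) and breaks early once all four are found.
import Mathlib
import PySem

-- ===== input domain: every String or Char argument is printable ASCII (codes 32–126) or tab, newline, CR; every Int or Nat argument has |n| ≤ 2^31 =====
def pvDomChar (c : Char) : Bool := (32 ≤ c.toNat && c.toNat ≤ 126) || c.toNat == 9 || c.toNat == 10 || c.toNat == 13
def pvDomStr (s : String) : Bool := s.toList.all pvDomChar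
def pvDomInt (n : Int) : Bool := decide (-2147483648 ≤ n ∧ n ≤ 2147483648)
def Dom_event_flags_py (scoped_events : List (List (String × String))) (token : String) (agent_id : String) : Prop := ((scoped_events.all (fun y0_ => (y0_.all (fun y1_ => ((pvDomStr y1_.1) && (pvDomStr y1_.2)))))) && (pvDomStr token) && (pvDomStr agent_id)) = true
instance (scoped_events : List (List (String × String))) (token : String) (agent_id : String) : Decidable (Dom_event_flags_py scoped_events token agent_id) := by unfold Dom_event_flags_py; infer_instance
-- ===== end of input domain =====

-- B replaces A's four separate scans of scoped_events by ONE pass that fills four slots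
-- (first match each) with an early break; objective: alternative single-pass decomposition.
-- Events are dicts: e["method"]/e["path"] can raise KeyError; those inputs are outside Pre_.

-- ===== PORT A =====
-- e[k] ported as getD with "" — exact on Pre_ (the key is present wherever A evaluates e[k]).
def aGet (e : List (String × String)) (k : String) : String :=
  (PySem.Dict.mk e).getD k ""

def aLandingPred (token_q agent_id : String) (e : List (String × String)) : Bool :=
  aGet e "method" == "GET"
  && (PySem.Str.isIn ("/agents/" ++ agent_id) (aGet e "path")
      || (if agent_id == "ceo" || agent_id == "devops" then
            PySem.Str.isIn ("/" ++ agent_id ++ "-ai") (aGet e "path") else false)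
      || (if agent_id == "ppc" then PySem.Str.isIn "/ppc-ai" (aGet e "path") else false)
      || (if agent_id == "personal" then PySem.Str.isIn "/personal-ai" (aGet e "path") else false))
  && PySem.Str.isIn token_q (aGet e "path")

def aCtaPred (expected_agent : String) (e : List (String × String)) : Bool :=
  aGet e "method" == "GET"
  && PySem.Str.isIn "/api/auth/google/start" (aGet e "path")
  && PySem.Str.isIn "from=agent-landing" (aGet e "path")
  && PySem.Str.isIn expected_agent (aGet e "path")

def aChatPred (expected_agent : String) (e : List (String × String)) : Bool :=
  aGet e "method" == "GET"
  && PySem.Str.isIn "/chat/" (aGet e "path")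
  && PySem.Str.isIn "from=agent-landing" (aGet e "path")
  && PySem.Str.isIn expected_agent (aGet e "path")

def aSendPred (e : List (String × String)) : Bool :=
  aGet e "method" == "POST"
  && (PySem.Str.isIn "/chat/" (aGet e "path")
      || PySem.Str.isIn "/api/chat" (aGet e "path")
      || PySem.Str.isIn "/api/chats" (aGet e "path"))

def event_flags_py (scoped_events : List (List (String × String))) (token : String) (agent_id : String) : List (String × Option (List (String × String))) :=
  let token_q := "src=" ++ token
  let expected_agent := "agent=" ++ agent_id
  let landing_view := scoped_events.find? (aLandingPred token_q agent_id)
  let cta_click := scoped_events.find? (aCtaPred expected_agent)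
  let post_oauth_chat := scoped_events.find? (aChatPred expected_agent)
  let first_send := scoped_events.find? aSendPred
  [("agent_landing_view", landing_view),
   ("agent_landing_cta_click", cta_click),
   ("post_oauth_redirect_to_chat", post_oauth_chat),
   ("first_chat_send", first_send)]

-- ===== PORT B =====
def bGet (e : List (String × String)) (k : String) : String :=
  (PySem.Dict.mk e).getD k ""

-- one pass: each slot keeps its first match; break once all four are filled
def bStep (token_q expected_agent : String) (landing_paths : List String)
    (e : List (String × String))
    (st : Option (List (String × String)) × Option (List (String × String)) ×
      Option (List (String × String)) × Option (List (String × String))) :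
    Option (List (String × String)) × Option (List (String × String)) ×
      Option (List (String × String)) × Option (List (String × String)) :=
  let (landing, cta, chat, send) := st
  let method := bGet e "method"
  if method == "GET" then
    let path := bGet e "path"
    let landing :=
      if landing.isNone
          && (PySem.Str.isIn token_q path
              && landing_paths.any (fun s => PySem.Str.isIn s path)) then some e else landing
    let cta :=
      if cta.isNone
          && (PySem.Str.isIn "/api/auth/google/start" path
              && PySem.Str.isIn "from=agent-landing" path
              && PySem.Str.isIn expected_agent path) then some e else cta
    let chat :=
      if chat.isNone
          && (PySem.Str.isIn "/chat/" path
              && PySem.Str.isIn "from=agent-landing" path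
              && PySem.Str.isIn expected_agent path) then some e else chat
    (landing, cta, chat, send)
  else if method == "POST" then
    let path := bGet e "path"
    let send :=
      if send.isNone
          && (PySem.Str.isIn "/chat/" path
              || PySem.Str.isIn "/api/chat" path
              || PySem.Str.isIn "/api/chats" path) then some e else send
    (landing, cta, chat, send)
  else (landing, cta, chat, send)

def bLoop (token_q expected_agent : String) (landing_paths : List String) :
    List (List (String × String)) →
    Option (List (String × String)) × Option (List (String × String)) ×
      Option (List (String × String)) × Option (List (String × String)) →
    Option (List (String × String)) × Option (List (String × String)) ×
      Option (List (String × String)) × Option (List (String × String))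
  | [], st => st
  | e :: rest, st =>
    let st' := bStep token_q expected_agent landing_paths e st
    if st'.1.isSome && st'.2.1.isSome && st'.2.2.1.isSome && st'.2.2.2.isSome then st'
    else bLoop token_q expected_agent landing_paths rest st'

def event_flags_py_alt (scoped_events : List (List (String × String))) (token : String) (agent_id : String) : List (String × Option (List (String × String))) :=
  let token_q := "src=" ++ token
  let expected_agent := "agent=" ++ agent_id
  let landing_paths :=
    ["/agents/" ++ agent_id]
      ++ (if agent_id == "ceo" || agent_id == "devops" || agent_id == "ppc" || agent_id == "personal"
          then ["/" ++ agent_id ++ "-ai"] else [])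
  let (landing, cta, chat, send) :=
    bLoop token_q expected_agent landing_paths scoped_events (none, none, none, none)
  [("agent_landing_view", landing),
   ("agent_landing_cta_click", cta),
   ("post_oauth_redirect_to_chat", chat),
   ("first_chat_send", send)]

-- ===== PRECONDITION & SPEC =====
-- Pre_ excludes exactly the inputs where A raises KeyError: an event with no "method" key,
-- or a GET/POST event with no "path" key.
def Pre_event_flags_py (scoped_events : List (List (String × String))) (_token : String) (_agent_id : String) : Prop :=
  ∀ e ∈ scoped_events,
    (PySem.Dict.mk e).contains "method" = true ∧
    (((PySem.Dict.mk e).getD "method" "" = "GET" ∨ (PySem.Dict.mk e).getD "method" "" = "POST") →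
      (PySem.Dict.mk e).contains "path" = true)

instance (scoped_events : List (List (String × String))) (token : String) (agent_id : String) : Decidable (Pre_event_flags_py scoped_events token agent_id) := by unfold Pre_event_flags_py; infer_instance

def pvWitness_event_flags_py : (List (List (String × String))) × String × String :=
  ([[("method", "GET"), ("path", "/agents/ceo?src=t1")],
    [("method", "POST"), ("path", "/api/chat")]], "t1", "ceo")

def Spec_event_flags_py (scoped_events : List (List (String × String))) (token : String) (agent_id : String) (out : List (String × Option (List (String × String)))) : Prop := out = event_flags_py_alt scoped_events token agent_id
instance (scoped_events : List (List (String × String))) (token : String) (agent_id : String) (out : List (String × Option (List (String × String)))) : Decidable (Spec_event_flags_py scoped_events token agent_id out) := by unfold Spec_event_flags_py; infer_instance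

-- ===== CLAIM (what is proved, stated in full; the proofs are below) =====
def Claim_equal_event_flags_py : Prop := ∀ (scoped_events : List (List (String × String))) (token : String) (agent_id : String), Dom_event_flags_py scoped_events token agent_id → Pre_event_flags_py scoped_events token agent_id → Spec_event_flags_py scoped_events token agent_id (event_flags_py scoped_events token agent_id)

-- ===== LEMMAS AND PROOFS =====

-- B's effective per-slot predicates (what one iteration of bLoop tests for each slot)
def qLanding (token_q : String) (landing_paths : List String) (e : List (String × String)) : Bool :=
  bGet e "method" == "GET"
  && (PySem.Str.isIn token_q (bGet e "path")
      && landing_paths.any (fun s => PySem.Str.isIn s (bGet e "path")))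

-- the landing_paths B builds from agent_id
def bPaths (agent_id : String) : List String :=
  ["/agents/" ++ agent_id]
    ++ (if agent_id == "ceo" || agent_id == "devops" || agent_id == "ppc" || agent_id == "personal"
        then ["/" ++ agent_id ++ "-ai"] else [])

lemma aGet_eq_bGet : aGet = bGet := rfl

lemma qLanding_eq_aLandingPred (token_q agent_id : String) (e : List (String × String)) :
    qLanding token_q (bPaths agent_id) e = aLandingPred token_q agent_id e := by
  simp only [qLanding, bPaths, aLandingPred, aGet_eq_bGet]
  by_cases h1 : agent_id = "ceo"
  · subst h1; simp; try ac_rfl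
  · by_cases h2 : agent_id = "devops"
    · subst h2; simp; try ac_rfl
    · by_cases h3 : agent_id = "ppc"
      · subst h3; simp; try ac_rfl
      · by_cases h4 : agent_id = "personal"
        · subst h4; simp; try ac_rfl
        · have g1 : (agent_id == "ceo") = false := by simp [h1]
          have g2 : (agent_id == "devops") = false := by simp [h2]
          have g3 : (agent_id == "ppc") = false := by simp [h3]
          have g4 : (agent_id == "personal") = false := by simp [h4]
          simp [g1, g2, g3, g4]; try ac_rfl

lemma slot_step (o : Option (List (String × String))) (e : List (String × String))
    (rest : List (List (String × String))) (p : List (String × String) → Bool) :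
    (if o.isNone && p e then some e else o).or (rest.find? p) = o.or ((e :: rest).find? p) := by
  cases o <;> by_cases hp : p e = true <;> simp [List.find?_cons, hp]

lemma bStep_full (token_q expected_agent : String) (landing_paths : List String)
    (e : List (String × String))
    (o1 o2 o3 o4 : Option (List (String × String)))
    (h1 : o1.isSome = true) (h2 : o2.isSome = true) (h3 : o3.isSome = true) (h4 : o4.isSome = true) :
    bStep token_q expected_agent landing_paths e (o1, o2, o3, o4) = (o1, o2, o3, o4) := by
  cases o1 <;> cases o2 <;> cases o3 <;> cases o4 <;> simp_all <;>
    (unfold bStep; dsimp only; split_ifs <;> simp_all)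

lemma bLoop_full (token_q expected_agent : String) (landing_paths : List String)
    (xs : List (List (String × String)))
    (o1 o2 o3 o4 : Option (List (String × String)))
    (h1 : o1.isSome = true) (h2 : o2.isSome = true) (h3 : o3.isSome = true) (h4 : o4.isSome = true) :
    bLoop token_q expected_agent landing_paths xs (o1, o2, o3, o4) = (o1, o2, o3, o4) := by
  induction xs with
  | nil => simp [bLoop]
  | cons e rest ih =>
    rw [bLoop]
    rw [bStep_full token_q expected_agent landing_paths e o1 o2 o3 o4 h1 h2 h3 h4]
    simp [h1, h2, h3, h4]

lemma bLoop_cons (token_q expected_agent : String) (landing_paths : List String)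
    (e : List (String × String)) (rest : List (List (String × String)))
    (st : Option (List (String × String)) × Option (List (String × String)) ×
      Option (List (String × String)) × Option (List (String × String))) :
    bLoop token_q expected_agent landing_paths (e :: rest) st =
      bLoop token_q expected_agent landing_paths rest
        (bStep token_q expected_agent landing_paths e st) := by
  rw [bLoop]
  split_ifs with h
  · simp only [Bool.and_eq_true] at h
    rw [bLoop_full token_q expected_agent landing_paths rest _ _ _ _ h.1.1.1 h.1.1.2 h.1.2 h.2]

  · rfl

lemma bStep_1 (token_q expected_agent : String) (landing_paths : List String)
    (e : List (String × String)) (lv cta chat snd : Option (List (String × String))) :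
    (bStep token_q expected_agent landing_paths e (lv, cta, chat, snd)).1 =
      if lv.isNone && qLanding token_q landing_paths e then some e else lv := by
  unfold bStep qLanding
  dsimp only
  by_cases hg : (bGet e "method" == "GET") = true <;>
    simp [hg] <;> split_ifs <;> simp

lemma bStep_21 (token_q expected_agent : String) (landing_paths : List String)
    (e : List (String × String)) (lv cta chat snd : Option (List (String × String))) :
    (bStep token_q expected_agent landing_paths e (lv, cta, chat, snd)).2.1 =
      if cta.isNone && aCtaPred expected_agent e then some e else cta := by
  unfold bStep aCtaPred
  dsimp only
  have : aGet e "method" = bGet e "method" := rfl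
  have hp : aGet e "path" = bGet e "path" := rfl
  by_cases hg : (bGet e "method" == "GET") = true <;>
    simp [hg, this, hp, Bool.and_assoc] <;> split_ifs <;> simp

lemma bStep_221 (token_q expected_agent : String) (landing_paths : List String)
    (e : List (String × String)) (lv cta chat snd : Option (List (String × String))) :
    (bStep token_q expected_agent landing_paths e (lv, cta, chat, snd)).2.2.1 =
      if chat.isNone && aChatPred expected_agent e then some e else chat := by
  unfold bStep aChatPred
  dsimp only
  have : aGet e "method" = bGet e "method" := rfl
  have hp : aGet e "path" = bGet e "path" := rfl
  by_cases hg : (bGet e "method" == "GET") = true <;>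
    simp [hg, this, hp, Bool.and_assoc] <;> split_ifs <;> simp

lemma bStep_222 (token_q expected_agent : String) (landing_paths : List String)
    (e : List (String × String)) (lv cta chat snd : Option (List (String × String))) :
    (bStep token_q expected_agent landing_paths e (lv, cta, chat, snd)).2.2.2 =
      if snd.isNone && aSendPred e then some e else snd := by
  unfold bStep aSendPred
  dsimp only
  have hm : aGet e "method" = bGet e "method" := rfl
  have hp : aGet e "path" = bGet e "path" := rfl
  by_cases hg : (bGet e "method" == "GET") = true
  · have hg' : bGet e "method" = "GET" := by simpa using hg
    have hnp : (bGet e "method" == "POST") = false := by simp [hg']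
    simp [hg, hm, hnp]
  · by_cases hpost : (bGet e "method" == "POST") = true <;> simp [hg, hpost, hm, hp]

-- one pass with slots = four find?s, regardless of the break
lemma bLoop_eq (token_q expected_agent : String) (landing_paths : List String)
    (xs : List (List (String × String)))
    (lv cta chat snd : Option (List (String × String))) :
    bLoop token_q expected_agent landing_paths xs (lv, cta, chat, snd) =
      (lv.or (xs.find? (qLanding token_q landing_paths)),
       cta.or (xs.find? (aCtaPred expected_agent)),
       chat.or (xs.find? (aChatPred expected_agent)),
       snd.or (xs.find? aSendPred)) := by
  induction xs generalizing lv cta chat snd with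
  | nil => simp [bLoop]
  | cons e rest ih =>
    have h1 := bStep_1 token_q expected_agent landing_paths e lv cta chat snd
    have h2 := bStep_21 token_q expected_agent landing_paths e lv cta chat snd
    have h3 := bStep_221 token_q expected_agent landing_paths e lv cta chat snd
    have h4 := bStep_222 token_q expected_agent landing_paths e lv cta chat snd
    have hstep : bStep token_q expected_agent landing_paths e (lv, cta, chat, snd) =
        (if lv.isNone && qLanding token_q landing_paths e then some e else lv,
         if cta.isNone && aCtaPred expected_agent e then some e else cta,
         if chat.isNone && aChatPred expected_agent e then some e else chat,
         if snd.isNone && aSendPred e then some e else snd) := by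
      conv_lhs => rw [show bStep token_q expected_agent landing_paths e (lv, cta, chat, snd) =
        ((bStep token_q expected_agent landing_paths e (lv, cta, chat, snd)).1,
         (bStep token_q expected_agent landing_paths e (lv, cta, chat, snd)).2.1,
         (bStep token_q expected_agent landing_paths e (lv, cta, chat, snd)).2.2.1,
         (bStep token_q expected_agent landing_paths e (lv, cta, chat, snd)).2.2.2) from rfl]
      rw [h1, h2, h3, h4]
    rw [bLoop_cons, hstep, ih]
    rw [slot_step lv e rest, slot_step cta e rest, slot_step chat e rest, slot_step snd e rest]

-- ===== VERDICT (by name: the statement is the Claim_ definition above) =====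
theorem event_flags_py_spec : Claim_equal_event_flags_py := by
  intro scoped_events token agent_id _hDom _hPre
  unfold Spec_event_flags_py event_flags_py event_flags_py_alt
  dsimp only
  rw [bLoop_eq]
  have hq := funext (qLanding_eq_aLandingPred ("src=" ++ token) agent_id)
  unfold bPaths at hq
  rw [hq]
  simp
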